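-- pv_equiv track=rewrite | github.com/LutzGue/projects | romannumeral_generator/__archive/__romannumeral_generator_V002.py | add_brackets
-- ===== SOURCE A (Python) =====
-- def add_brackets(s: str, h_limit: int, f_limit: int, e_limit: int, h=0, f=0, e=0) -> set:
--     if h >= h_limit or f >= f_limit or e >= e_limit or len(s) <= 2:
--         return {s}
--     else:
--         results = set()
--         for i in range(1, min(e_limit, len(s) - 1) + 1):
--             for j in range(len(s) - i):
--                 if s[j:j+i+1].strip():
--                     t = s[:j] + '(' + s[j:j+i+1] + ')' + s[j+i+1:]
--                     if '()' not in t: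
--                         results.add(t)
--                         results.update(add_brackets(t, h_limit, f_limit, e_limit, h+1, f+1, e+1))
--         return results
-- ===== SOURCE B (Python) =====
-- def add_brackets(s: str, h_limit: int, f_limit: int, e_limit: int, h=0, f=0, e=0) -> set:
--     # Memoized: each distinct (string, remaining depth) is expanded once.
--     cache = {}
--
--     def cands(s):
--         n = len(s)
--         return [t
--                 for i in range(1, min(e_limit, n - 1) + 1)
--                 for j in range(n - i)
--                 if s[j:j + i + 1].strip()
--                 for t in [s[:j] + '(' + s[j:j + i + 1] + ')' + s[j + i + 1:]]
--                 if '()' not in t]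
--
--     def go(s, d):
--         if d <= 0 or len(s) <= 2:
--             return {s}
--         key = (s, d)
--         if key in cache:
--             return cache[key]
--         res = set()
--         for t in cands(s):
--             res.add(t)
--             res |= go(t, d - 1)
--         cache[key] = res
--         return res
--
--     return go(s, min(h_limit - h, f_limit - f, e_limit - e))
-- ===== Notes on version B (the rewrite author's own statement) =====
-- stated objective: alternative
-- what changed: B memoizes A's recursion on the pair (string, remaining depth) with a dict cache, so each distinct reachable (string, depth) state is expanded once instead of once per derivation path, and exploits that h, f, e are incremented in lockstep so only min(h_limit-h, f_limit-f, e_limit-e) matters.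
import Mathlib
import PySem

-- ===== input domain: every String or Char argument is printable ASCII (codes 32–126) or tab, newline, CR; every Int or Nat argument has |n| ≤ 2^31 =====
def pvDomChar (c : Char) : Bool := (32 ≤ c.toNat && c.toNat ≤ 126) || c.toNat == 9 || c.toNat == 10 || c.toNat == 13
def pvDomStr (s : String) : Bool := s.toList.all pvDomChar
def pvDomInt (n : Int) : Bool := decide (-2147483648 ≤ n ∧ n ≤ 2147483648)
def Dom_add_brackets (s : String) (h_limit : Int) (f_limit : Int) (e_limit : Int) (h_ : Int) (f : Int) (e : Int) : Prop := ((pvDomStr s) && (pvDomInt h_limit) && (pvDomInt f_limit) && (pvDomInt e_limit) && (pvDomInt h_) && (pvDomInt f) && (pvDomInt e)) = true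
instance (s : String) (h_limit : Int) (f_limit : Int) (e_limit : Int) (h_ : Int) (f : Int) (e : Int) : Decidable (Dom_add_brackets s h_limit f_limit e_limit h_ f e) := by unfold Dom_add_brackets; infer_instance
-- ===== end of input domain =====

-- ===== PORT A =====
-- B memoizes A's recursion on (string, remaining depth) with a dict cache; objective: alternative (each distinct state is expanded once; the output set is still exponential).
-- A's recursion increments h, f, e together, so it terminates after min(h_limit-h, f_limit-f, e_limit-e)
-- steps; the port runs on exactly that fuel (at fuel 0 the Python base condition holds, so [s] is faithful).
def adbA : Nat → String → Int → Int → Int → Int → Int → Int → List String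
  | 0, s, _, _, _, _, _, _ => [s]
  | fuel+1, s, h_limit, f_limit, e_limit, h_, f, e =>
    if h_ ≥ h_limit ∨ f ≥ f_limit ∨ e ≥ e_limit ∨ PySem.Str.len s ≤ 2 then [s]
    else
      (PySem.List.pyRange 1 (min e_limit (PySem.Str.len s - 1) + 1) 1).foldl (fun results i =>
        (PySem.List.pyRange 0 (PySem.Str.len s - i) 1).foldl (fun results j =>
          if PySem.Str.strip (PySem.Str.slice s (some j) (some (j + i + 1))) ≠ "" then
            let t := PySem.Str.slice s none (some j) ++ "(" ++
                     PySem.Str.slice s (some j) (some (j + i + 1)) ++ ")" ++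
                     PySem.Str.slice s (some (j + i + 1)) none
            if PySem.Str.isIn "()" t = false then
              (adbA fuel t h_limit f_limit e_limit (h_ + 1) (f + 1) (e + 1)).foldl
                PySem.Set.add (PySem.Set.add results t)
            else results
          else results) results) (PySem.Set.empty)

def add_brackets (s : String) (h_limit : Int) (f_limit : Int) (e_limit : Int) (h_ : Int) (f : Int) (e : Int) : List String :=
  adbA (min (h_limit - h_) (min (f_limit - f) (e_limit - e))).toNat s h_limit f_limit e_limit h_ f e

-- ===== PORT B =====
-- Source B's cands(s): the candidate strings, as one comprehension.
def adbCands (e_limit : Int) (s : String) : List String :=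
  let n := PySem.Str.len s
  (PySem.List.pyRange 1 (min e_limit (n - 1) + 1) 1).flatMap (fun i =>
    (PySem.List.pyRange 0 (n - i) 1).filterMap (fun j =>
      if PySem.Str.strip (PySem.Str.slice s (some j) (some (j + i + 1))) ≠ "" then
        let t := PySem.Str.slice s none (some j) ++ "(" ++
                 PySem.Str.slice s (some j) (some (j + i + 1)) ++ ")" ++
                 PySem.Str.slice s (some (j + i + 1)) none
        if PySem.Str.isIn "()" t = false then some t else none
      else none))

-- Source B's go(s, d) with the cache threaded through; fuel = d.toNat (d <= 0 is the fuel-0 base case).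
def adbGo (e_limit : Int) : Nat → String → Int → PySem.Dict (String × Int) (List String) →
    List String × PySem.Dict (String × Int) (List String)
  | 0, s, _, cache => ([s], cache)
  | fuel+1, s, d, cache =>
    if PySem.Str.len s ≤ 2 then ([s], cache)
    else
      match cache.get? (s, d) with
      | some r => (r, cache)
      | none =>
        let p := (adbCands e_limit s).foldl
          (fun (p : List String × PySem.Dict (String × Int) (List String)) t =>
            let q := adbGo e_limit fuel t (d - 1) p.2
            (q.1.foldl PySem.Set.add (PySem.Set.add p.1 t), q.2))
          (PySem.Set.empty, cache)
        (p.1, p.2.insert (s, d) p.1)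

def add_brackets_alt (s : String) (h_limit : Int) (f_limit : Int) (e_limit : Int) (h_ : Int) (f : Int) (e : Int) : List String :=
  let d := min (h_limit - h_) (min (f_limit - f) (e_limit - e))
  (adbGo e_limit d.toNat s d PySem.Dict.empty).1

-- ===== PRECONDITION & SPEC =====
def Spec_add_brackets (s : String) (h_limit : Int) (f_limit : Int) (e_limit : Int) (h_ : Int) (f : Int) (e : Int) (out : List String) : Prop := out = add_brackets_alt s h_limit f_limit e_limit h_ f e
instance (s : String) (h_limit : Int) (f_limit : Int) (e_limit : Int) (h_ : Int) (f : Int) (e : Int) (out : List String) : Decidable (Spec_add_brackets s h_limit f_limit e_limit h_ f e out) := by unfold Spec_add_brackets; infer_instance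

-- ===== CLAIM (what is proved, stated in full; the proofs are below) =====
def Claim_equal_add_brackets : Prop := ∀ (s : String) (h_limit : Int) (f_limit : Int) (e_limit : Int) (h_ : Int) (f : Int) (e : Int), Dom_add_brackets s h_limit f_limit e_limit h_ f e → Spec_add_brackets s h_limit f_limit e_limit h_ f e (add_brackets s h_limit f_limit e_limit h_ f e)

-- ===== LEMMAS AND PROOFS =====

-- Common normal form: A's recursion, expressed on the fuel alone over the candidate list.
def adbN (e_limit : Int) : Nat → String → List String
  | 0, s => [s]
  | fuel+1, s =>
    if PySem.Str.len s ≤ 2 then [s]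
    else (adbCands e_limit s).foldl
      (fun res t => (adbN e_limit fuel t).foldl PySem.Set.add (PySem.Set.add res t))
      (PySem.Set.empty)

-- a fold whose body either skips or steps = the fold of the selected elements
theorem pvFoldl_filterMap {β γ δ : Type} (sel : β → Option γ) (step : δ → γ → δ)
    (J : List β) (acc : δ) :
    J.foldl (fun a j => (sel j).elim a (step a)) acc = (J.filterMap sel).foldl step acc := by
  induction J generalizing acc with
  | nil => rfl
  | cons b J ih =>
    simp only [List.foldl_cons, List.filterMap_cons]
    cases h : sel b <;> simp only [Option.elim_none, Option.elim_some, List.foldl_cons, ih]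

theorem pvFoldl2_flatMap {α β γ δ : Type} (I : List α) (J : α → List β)
    (sel : α → β → Option γ) (step : δ → γ → δ) (bodyA : α → δ → β → δ)
    (hbody : ∀ a acc b, bodyA a acc b = ((sel a b).elim acc (step acc)))
    (init : δ) :
    I.foldl (fun acc a => (J a).foldl (bodyA a) acc) init
      = (I.flatMap (fun a => (J a).filterMap (sel a))).foldl step init := by
  induction I generalizing init with
  | nil => rfl
  | cons a I ih =>
    simp only [List.foldl_cons, List.flatMap_cons, List.foldl_append]
    rw [show (J a).foldl (bodyA a) init = ((J a).filterMap (sel a)).foldl step init from by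
      rw [← pvFoldl_filterMap (sel a) step (J a) init]
      congr 1
      funext acc b
      rw [hbody], ih]

theorem adbA_eq_adbN (fuel : Nat) : ∀ (s : String) (h_limit f_limit e_limit h_ f e : Int),
    fuel = (min (h_limit - h_) (min (f_limit - f) (e_limit - e))).toNat →
    adbA fuel s h_limit f_limit e_limit h_ f e = adbN e_limit fuel s := by
  induction fuel with
  | zero => intro s hl fl el h_ f e _; rfl
  | succ fuel ih =>
    intro s hl fl el h_ f e hm
    have hlt : h_ < hl ∧ f < fl ∧ e < el := by omega
    rw [adbA, adbN]
    by_cases hs : PySem.Str.len s ≤ 2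
    · rw [if_pos (Or.inr (Or.inr (Or.inr hs))), if_pos hs]
    · rw [if_neg (fun hor => hor.elim (by omega) (fun hor => hor.elim (by omega) (fun hor => hor.elim (by omega) hs))),
        if_neg hs]
      have ihall : ∀ t, adbA fuel t hl fl el (h_ + 1) (f + 1) (e + 1) = adbN el fuel t := by
        intro t; exact ih t hl fl el (h_+1) (f+1) (e+1) (by omega)
      simp only [ihall, adbCands]
      exact pvFoldl2_flatMap _ _ _ _ _
        (by
          intro i acc j
          split_ifs <;> rfl) PySem.Set.empty

-- cache invariant: every entry is the normal-form value at its key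
def adbInv (e_limit : Int) (cache : PySem.Dict (String × Int) (List String)) : Prop :=
  ∀ (s : String) (d : Int) (r : List String),
    cache.get? (s, d) = some r → r = adbN e_limit d.toNat s

theorem adbGo_correct (e_limit : Int) (fuel : Nat) :
    ∀ (s : String) (d : Int) (cache : PySem.Dict (String × Int) (List String)),
      fuel = d.toNat → adbInv e_limit cache →
      (adbGo e_limit fuel s d cache).1 = adbN e_limit fuel s ∧
        adbInv e_limit (adbGo e_limit fuel s d cache).2 := by
  induction fuel with
  | zero => intro s d cache _ hinv; exact ⟨rfl, hinv⟩
  | succ fuel ih =>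
    intro s d cache hd hinv
    rw [adbGo, adbN]
    by_cases hs : PySem.Str.len s ≤ 2
    · rw [if_pos hs, if_pos hs]; exact ⟨rfl, hinv⟩
    · rw [if_neg hs, if_neg hs]
      split
      next r hget =>
        refine ⟨?_, hinv⟩
        have hx := hinv s d r hget
        rw [← hd] at hx
        rw [adbN, if_neg hs] at hx
        exact hx
      next hget =>
        have key : ∀ (L : List String) (acc : List String)
            (c : PySem.Dict (String × Int) (List String)), adbInv e_limit c →
            (L.foldl (fun (p : List String × PySem.Dict (String × Int) (List String)) t =>
              let q := adbGo e_limit fuel t (d - 1) p.2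
              (q.1.foldl PySem.Set.add (PySem.Set.add p.1 t), q.2)) (acc, c)).1
              = L.foldl (fun res t =>
                  (adbN e_limit fuel t).foldl PySem.Set.add (PySem.Set.add res t)) acc ∧
            adbInv e_limit
              (L.foldl (fun (p : List String × PySem.Dict (String × Int) (List String)) t =>
                let q := adbGo e_limit fuel t (d - 1) p.2
                (q.1.foldl PySem.Set.add (PySem.Set.add p.1 t), q.2)) (acc, c)).2 := by
          intro L
          induction L with
          | nil => intro acc c hc; exact ⟨rfl, hc⟩
          | cons t L ihL =>
            intro acc c hc
            have hrec := ih t (d - 1) c (by omega) hc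
            simp only [List.foldl_cons]
            rw [hrec.1]
            exact ihL _ _ hrec.2
        have hkey := key (adbCands e_limit s) PySem.Set.empty cache hinv
        refine ⟨hkey.1, ?_⟩
        intro s' d' r hr
        by_cases hk : (s', d') = (s, d)
        · have hs2 : s' = s := congrArg Prod.fst hk
          have hd2 : d' = d := congrArg Prod.snd hk
          subst hs2; subst hd2
          rw [PySem.Dict.get?_insert_self] at hr
          cases hr
          rw [← hd]
          exact hkey.1.trans (by rw [adbN, if_neg hs])
        · rw [PySem.Dict.get?_insert_of_ne] at hr
          · exact hkey.2 s' d' r hr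
          · exact hk

theorem add_brackets_spec : Claim_equal_add_brackets := by
  intro s hl fl el h_ f e _
  unfold Spec_add_brackets add_brackets add_brackets_alt
  rw [adbA_eq_adbN _ s hl fl el h_ f e rfl]
  exact ((adbGo_correct el _ s _ PySem.Dict.empty rfl
    (fun s' d' r hr => by rw [PySem.Dict.get?_empty] at hr; cases hr)).1).symm
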